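-- pv_equiv track=rewrite | github.com/razon1494/sql-query-feedback-system | backend/sql_parser.py | _extract_top_level_clauses
-- ===== SOURCE A (Python) =====
-- from typing import Optional, List, Dict, Any
--
-- def _keyword_split(sql: str, keyword: str) -> tuple:
--     """Split SQL at a top-level keyword (not inside parentheses)."""
--     upper = sql.upper()
--     depth = 0
--     i = 0
--     kw = keyword.upper()
--     while i < len(sql):
--         ch = sql[i]
--         if ch == '(':
--             depth += 1
--         elif ch == ')':
--             depth -= 1
--         elif depth == 0 and upper[i:i+len(kw)] == kw:
--             # Make sure it's a word boundary
--             before = sql[i-1] if i > 0 else ' '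
--             after = sql[i+len(kw)] if i+len(kw) < len(sql) else ' '
--             if not before.isalnum() and before != '_' and not after.isalnum() and after != '_':
--                 return sql[:i].strip(), sql[i+len(kw):].strip()
--         i += 1
--     return sql.strip(), None
--
-- def _extract_top_level_clauses(sql: str) -> Dict[str, str]:
--     """
--     Extract top-level SQL clauses: SELECT, FROM, WHERE, GROUP BY, HAVING, ORDER BY.
--     Ignores clause keywords that appear inside subquery parentheses.
--     """
--     clauses = {}
--     upper = sql.upper().strip()
--
--     # Detect SET operations at top level
--     for op in ['UNION ALL', 'UNION', 'INTERSECT', 'EXCEPT']: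
--         left, right = _keyword_split(sql, op)
--         if right is not None:
--             clauses['SET_OP'] = op
--             clauses['SET_LEFT'] = left
--             clauses['SET_RIGHT'] = right
--             return clauses
--
--     # Ordered list of clause keywords to find
--     clause_keywords = ['SELECT', 'FROM', 'WHERE', 'GROUP BY', 'HAVING', 'ORDER BY', 'LIMIT']
--     positions = []
--
--     for kw in clause_keywords:
--         pos = _find_top_level_keyword(upper, kw)
--         if pos >= 0:
--             positions.append((pos, kw))
--
--     positions.sort(key=lambda x: x[0])
--
--     for idx, (pos, kw) in enumerate(positions):
--         start = pos + len(kw)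
--         end = positions[idx+1][0] if idx+1 < len(positions) else len(sql)
--         clauses[kw] = sql[start:end].strip()
--
--     return clauses
--
-- def _find_top_level_keyword(upper_sql: str, keyword: str) -> int:
--     """Find first occurrence of keyword at depth 0."""
--     depth = 0
--     kw = keyword.upper()
--     i = 0
--     while i < len(upper_sql):
--         ch = upper_sql[i]
--         if ch == '(':
--             depth += 1
--         elif ch == ')':
--             depth -= 1
--         elif depth == 0 and upper_sql[i:i+len(kw)] == kw:
--             before = upper_sql[i-1] if i > 0 else ' '
--             after  = upper_sql[i+len(kw)] if i+len(kw) < len(upper_sql) else ' '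
--             if (not before.isalnum() and before != '_') and (not after.isalnum() and after != '_'):
--                 return i
--         i += 1
--     return -1
-- ===== SOURCE B (Python) =====
-- def _keyword_split(sql: str, keyword: str) -> tuple:
--     """Split SQL at a top-level keyword (not inside parentheses)."""
--     upper = sql.upper()
--     depth = 0
--     i = 0
--     kw = keyword.upper()
--     while i < len(sql):
--         ch = sql[i]
--         if ch == '(':
--             depth += 1
--         elif ch == ')':
--             depth -= 1
--         elif depth == 0 and upper[i:i+len(kw)] == kw:
--             before = sql[i-1] if i > 0 else ' '
--             after = sql[i+len(kw)] if i+len(kw) < len(sql) else ' '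
--             if not before.isalnum() and before != '_' and not after.isalnum() and after != '_':
--                 return sql[:i].strip(), sql[i+len(kw):].strip()
--         i += 1
--     return sql.strip(), None
--
-- def _extract_top_level_clauses(sql: str) -> dict:
--     upper = sql.upper().strip()
--     for op in ['UNION ALL', 'UNION', 'INTERSECT', 'EXCEPT']:
--         left, right = _keyword_split(sql, op)
--         if right is not None:
--             return {'SET_OP': op, 'SET_LEFT': left, 'SET_RIGHT': right}
--     kws = ['SELECT', 'FROM', 'WHERE', 'GROUP BY', 'HAVING', 'ORDER BY', 'LIMIT']
--     # single pass over `upper`: record the first depth-0 position of each keyword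
--     found = {}
--     depth = 0
--     for i, ch in enumerate(upper):
--         if ch == '(':
--             depth += 1
--         elif ch == ')':
--             depth -= 1
--         elif depth == 0:
--             for kw in kws:
--                 if kw not in found and upper[i:i+len(kw)] == kw:
--                     before = upper[i-1] if i > 0 else ' '
--                     after = upper[i+len(kw)] if i+len(kw) < len(upper) else ' '
--                     if not before.isalnum() and before != '_' and not after.isalnum() and after != '_':
--                         found[kw] = i
--     pairs = sorted(((p, k) for k, p in found.items()), key=lambda x: x[0])
--     ends = [p for p, _ in pairs[1:]] + [len(sql)]
--     return {kw: sql[pos + len(kw):end].strip() for (pos, kw), end in zip(pairs, ends)}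
-- ===== Notes on version B (the rewrite author's own statement) =====
-- stated objective: alternative
-- what changed: A calls a depth-tracking keyword finder once per clause keyword (seven independent scans of the string); B makes a single depth-tracking pass that records the first top-level position of every clause keyword in one dict, then sorts the recorded (pos, kw) pairs and slices by zipping each pair with the next position.
import Mathlib
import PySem

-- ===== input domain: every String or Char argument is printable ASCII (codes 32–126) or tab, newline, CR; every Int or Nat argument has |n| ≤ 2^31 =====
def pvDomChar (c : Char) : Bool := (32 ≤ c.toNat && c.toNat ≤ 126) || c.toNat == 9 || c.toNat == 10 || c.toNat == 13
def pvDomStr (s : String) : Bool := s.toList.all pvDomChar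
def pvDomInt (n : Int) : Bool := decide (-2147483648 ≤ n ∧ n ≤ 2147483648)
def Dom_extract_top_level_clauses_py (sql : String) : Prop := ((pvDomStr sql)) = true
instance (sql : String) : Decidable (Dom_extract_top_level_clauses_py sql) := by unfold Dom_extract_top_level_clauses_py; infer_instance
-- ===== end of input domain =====

-- B replaces A's seven independent keyword scans by one depth-tracking pass that records the
-- first top-level position of every clause keyword (objective: alternative decomposition, one pass).

-- ===== SHARED HELPERS (code both Pythons contain verbatim: _keyword_split, the SET-operator
-- loop, and the slice-and-strip that makes one clause entry) =====

/-- word-boundary test: before = s[i-1] if i>0 else ' '; after = s[i+klen] if i+klen<len(s) else ' ' -/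
def pvBOK (s : List Char) (i klen : Nat) : Bool :=
  (!(PySem.Chars.isalnum (if 0 < i then s.getD (i-1) ' ' else ' '))
    && !((if 0 < i then s.getD (i-1) ' ' else ' ') == '_'))
  && (!(PySem.Chars.isalnum (if i + klen < s.length then s.getD (i+klen) ' ' else ' '))
    && !((if i + klen < s.length then s.getD (i+klen) ' ' else ' ') == '_'))

/-- upper[i:i+len(kw)] == kw -/
def pvMatchAt (u : List Char) (i : Nat) (kw : List Char) : Bool :=
  PySem.List.slice u (some (i:Int)) (some ((i:Int) + (kw.length:Int))) == kw

/-- _keyword_split's while loop -/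
def pvKwSplitAux (s u kw : List Char) (depth : Int) (i : Nat) : List Char × Option (List Char) :=
  if h : i < s.length then
    if s[i] = '(' then pvKwSplitAux s u kw (depth+1) (i+1)
    else if s[i] = ')' then pvKwSplitAux s u kw (depth-1) (i+1)
    else if depth = 0 ∧ pvMatchAt u i kw then
      if pvBOK s i kw.length then
        (PySem.Chars.strip (PySem.List.slice s none (some (i:Int))),
         some (PySem.Chars.strip (PySem.List.slice s (some ((i:Int)+(kw.length:Int))) none)))
      else pvKwSplitAux s u kw depth (i+1)
    else pvKwSplitAux s u kw depth (i+1)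
  else (PySem.Chars.strip s, none)
termination_by s.length - i

def pvKwSplit (s kw : List Char) : List Char × Option (List Char) :=
  pvKwSplitAux s (PySem.Chars.upper s) (PySem.Chars.upper kw) 0 0

def pvSetOps : List (List Char) :=
  ["UNION ALL".toList, "UNION".toList, "INTERSECT".toList, "EXCEPT".toList]

/-- the SET-operator for-loop with its early return -/
def pvSetOpDetect (s : List Char) : List (List Char) → Option (List Char × List Char × List Char)
  | [] => none
  | op :: rest =>
    match pvKwSplit s op with
    | (l, some r) => some (op, l, r)
    | (_, none) => pvSetOpDetect s rest

def pvClauseKws : List (List Char) :=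
  ["SELECT".toList, "FROM".toList, "WHERE".toList, "GROUP BY".toList,
   "HAVING".toList, "ORDER BY".toList, "LIMIT".toList]

/-- clauses[kw] = sql[a:b].strip() -/
def pvMkClause (s : List Char) (kw : List Char) (a b : Int) : String × String :=
  (String.ofList kw, String.ofList (PySem.Chars.strip (PySem.List.slice s (some a) (some b))))

-- ===== PORT A =====

/-- _find_top_level_keyword's while loop -/
def pvFindAux (u kw : List Char) (depth : Int) (i : Nat) : Int :=
  if h : i < u.length then
    if u[i] = '(' then pvFindAux u kw (depth+1) (i+1)
    else if u[i] = ')' then pvFindAux u kw (depth-1) (i+1)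
    else if depth = 0 ∧ pvMatchAt u i kw then
      if pvBOK u i kw.length then (i:Int) else pvFindAux u kw depth (i+1)
    else pvFindAux u kw depth (i+1)
  else -1
termination_by u.length - i

def pvFindTL (u kw : List Char) : Int := pvFindAux u (PySem.Chars.upper kw) 0 0

/-- A's final loop: for idx,(pos,kw) in enumerate(positions): end = positions[idx+1][0] if … else len(sql) -/
def pvAssembleA (s : List Char) (ps : List (Int × List Char)) : List (String × String) :=
  (PySem.List.enumerate ps).foldl
    (fun acc ix =>
      acc ++ [pvMkClause s ix.2.2 (ix.2.1 + (ix.2.2.length : Int))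
        (if ix.1 + 1 < (ps.length : Int) then (PySem.List.pyGetD ps (ix.1 + 1) (0, [])).1
         else (s.length : Int))]) []

def extract_top_level_clauses_py (sql : String) : List (String × String) :=
  let s := sql.toList
  match pvSetOpDetect s pvSetOps with
  | some (op, l, r) =>
    [("SET_OP", String.ofList op), ("SET_LEFT", String.ofList l), ("SET_RIGHT", String.ofList r)]
  | none =>
    let u := PySem.Chars.strip (PySem.Chars.upper s)
    let positions := pvClauseKws.foldl
      (fun acc kw => if 0 ≤ pvFindTL u kw then acc ++ [(pvFindTL u kw, kw)] else acc) []
    pvAssembleA s (PySem.List.sorted positions (fun x => x.1) false)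

-- ===== PORT B =====

/-- B's inner loop: try every not-yet-found keyword at position i -/
def pvScanStep (u : List Char) (i : Nat) (d : PySem.Dict (List Char) Int) : PySem.Dict (List Char) Int :=
  pvClauseKws.foldl
    (fun d kw =>
      if !d.contains kw && pvMatchAt u i kw && pvBOK u i kw.length then d.insert kw (i:Int) else d) d

/-- B's single pass over `upper`, tracking parenthesis depth -/
def pvScanAux (u : List Char) (depth : Int) (i : Nat) (d : PySem.Dict (List Char) Int) :
    PySem.Dict (List Char) Int :=
  if h : i < u.length then
    if u[i] = '(' then pvScanAux u (depth+1) (i+1) d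
    else if u[i] = ')' then pvScanAux u (depth-1) (i+1) d
    else if depth = 0 then pvScanAux u depth (i+1) (pvScanStep u i d)
    else pvScanAux u depth (i+1) d
  else d
termination_by u.length - i

/-- B's final comprehension: zip the sorted pairs with the list of next positions -/
def pvAssembleB (s : List Char) (ps : List (Int × List Char)) : List (String × String) :=
  (ps.zip ((PySem.List.slice ps (some 1) none).map (·.1) ++ [(s.length : Int)])).map
    (fun pe => pvMkClause s pe.1.2 (pe.1.1 + (pe.1.2.length : Int)) pe.2)

def extract_top_level_clauses_py_alt (sql : String) : List (String × String) :=
  let s := sql.toList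
  match pvSetOpDetect s pvSetOps with
  | some (op, l, r) =>
    [("SET_OP", String.ofList op), ("SET_LEFT", String.ofList l), ("SET_RIGHT", String.ofList r)]
  | none =>
    let u := PySem.Chars.strip (PySem.Chars.upper s)
    let found := pvScanAux u 0 0 PySem.Dict.empty
    pvAssembleB s
      (PySem.List.sorted (found.items.map (fun kp => (kp.2, kp.1))) (fun x => x.1) false)

-- ===== PRECONDITION & SPEC =====
def Spec_extract_top_level_clauses_py (sql : String) (out : List (String × String)) : Prop := out = extract_top_level_clauses_py_alt sql
instance (sql : String) (out : List (String × String)) : Decidable (Spec_extract_top_level_clauses_py sql out) := by unfold Spec_extract_top_level_clauses_py; infer_instance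

-- ===== CLAIM (what is proved, stated in full; the proofs are below) =====
def Claim_equal_extract_top_level_clauses_py : Prop := ∀ (sql : String), Dom_extract_top_level_clauses_py sql → Spec_extract_top_level_clauses_py sql (extract_top_level_clauses_py sql)


-- ===== LEMMAS AND PROOFS =====

def pvCond (u : List Char) (i : Nat) (kw : List Char) : Bool :=
  pvMatchAt u i kw && pvBOK u i kw.length

def pvOptFind (u kw : List Char) (depth : Int) (i : Nat) : Option Int :=
  if 0 ≤ pvFindAux u kw depth i then some (pvFindAux u kw depth i) else none

theorem scanStep_get? (u : List Char) (i : Nat) (kws : List (List Char)) (hnd : kws.Nodup)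
    (d : PySem.Dict (List Char) Int) (kw : List Char) :
    (kws.foldl (fun d k => if !d.contains k && pvMatchAt u i k && pvBOK u i k.length
        then d.insert k (i:Int) else d) d).get? kw
      = if kw ∈ kws ∧ d.get? kw = none ∧ pvCond u i kw = true then some (i:Int) else d.get? kw := by
  induction kws generalizing d with
  | nil => simp
  | cons k rest ih =>
    simp only [List.foldl_cons]
    rw [ih (List.Nodup.of_cons hnd)]
    have hkrest : k ∉ rest := (List.nodup_cons.mp hnd).1
    by_cases hk : kw = k
    · subst hk
      have hnm : kw ∉ rest := hkrest
      simp only [hnm, false_and, if_false, List.mem_cons, true_or, true_and]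
      rw [PySem.Dict.contains_eq_isSome_get?]
      cases hd : d.get? kw with
      | some v =>
        rw [if_neg (by simp)]
        exact hd
      | none =>
        simp only [Option.isSome_none, Bool.not_false]
        by_cases hc : pvCond u i kw = true
        · rw [if_pos (by simpa [pvCond] using hc)]
          simp [PySem.Dict.get?_insert_self, hc]
        · rw [if_neg (by simpa [pvCond] using hc)]
          simp [hd, hc]
    · have hget : (if !d.contains k && pvMatchAt u i k && pvBOK u i k.length
          then d.insert k (i:Int) else d).get? kw = d.get? kw := by
        split
        · exact PySem.Dict.get?_insert_of_ne _ _ hk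
        · rfl
      rw [hget]
      simp [List.mem_cons, hk]

theorem optFind_hit (u kw : List Char) (i : Nat) (hi : i < u.length)
    (h1 : ¬ u[i] = '(') (h2 : ¬ u[i] = ')')
    (hm : pvMatchAt u i kw = true) (hb : pvBOK u i kw.length = true) :
    pvOptFind u kw 0 i = some (i : Int) := by
  unfold pvOptFind
  rw [pvFindAux]
  simp [hi, h1, h2, hm, hb]

theorem optFind_open (u kw : List Char) (depth : Int) (i : Nat) (hi : i < u.length)
    (h1 : u[i] = '(') :
    pvOptFind u kw depth i = pvOptFind u kw (depth+1) (i+1) := by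
  unfold pvOptFind; rw [pvFindAux]; simp [hi, h1]

theorem optFind_close (u kw : List Char) (depth : Int) (i : Nat) (hi : i < u.length)
    (h2 : u[i] = ')') :
    pvOptFind u kw depth i = pvOptFind u kw (depth-1) (i+1) := by
  unfold pvOptFind; rw [pvFindAux]; simp [hi, h2]

theorem optFind_skip (u kw : List Char) (depth : Int) (i : Nat) (hi : i < u.length)
    (h1 : ¬ u[i] = '(') (h2 : ¬ u[i] = ')')
    (h3 : ¬ (depth = 0 ∧ pvMatchAt u i kw = true ∧ pvBOK u i kw.length = true)) :
    pvOptFind u kw depth i = pvOptFind u kw depth (i+1) := by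
  unfold pvOptFind; rw [pvFindAux]
  by_cases hd : depth = 0 ∧ pvMatchAt u i kw = true
  · have hb : ¬ pvBOK u i kw.length = true := fun hb => h3 ⟨hd.1, hd.2, hb⟩
    simp [hi, h1, h2, hd, hb]
  · simp [hi, h1, h2, hd]

theorem optFind_end (u kw : List Char) (depth : Int) (i : Nat) (hi : ¬ i < u.length) :
    pvOptFind u kw depth i = none := by
  unfold pvOptFind; rw [pvFindAux]; simp [hi]

set_option maxHeartbeats 1000000 in
theorem scanAux_get? (u : List Char) (fuel : Nat) :
    ∀ (i : Nat), u.length - i ≤ fuel → ∀ (depth : Int) (d : PySem.Dict (List Char) Int)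
      (kw : List Char),
    (pvScanAux u depth i d).get? kw =
      if kw ∈ pvClauseKws then (d.get? kw).or (pvOptFind u kw depth i) else d.get? kw := by
  induction fuel with
  | zero =>
    intro i hfuel depth d kw
    have hi : ¬ i < u.length := by omega
    rw [pvScanAux, dif_neg hi, optFind_end u kw depth i hi]
    split <;> simp
  | succ n ih =>
    intro i hfuel depth d kw
    by_cases hi : i < u.length
    · rw [pvScanAux, dif_pos hi]
      have hfuel' : u.length - (i+1) ≤ n := by omega
      by_cases h1 : u[i] = '('
      · rw [if_pos h1, ih (i+1) hfuel' (depth+1) d kw]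
        split
        · rw [optFind_open u kw depth i hi h1]
        · rfl
      · rw [if_neg h1]
        by_cases h2 : u[i] = ')'
        · rw [if_pos h2, ih (i+1) hfuel' (depth-1) d kw]
          split
          · rw [optFind_close u kw depth i hi h2]
          · rfl
        · rw [if_neg h2]
          by_cases hd0 : depth = 0
          · rw [if_pos hd0, ih (i+1) hfuel' depth _ kw]
            subst hd0
            have hstep := scanStep_get? u i pvClauseKws (by decide) d kw
            by_cases hmem : kw ∈ pvClauseKws
            · rw [if_pos hmem]
              unfold pvScanStep at hstep ⊢
              cases hget : d.get? kw with
              | some v =>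
                rw [hstep]; simp [hget, hmem]
              | none =>
                by_cases hc : pvCond u i kw = true
                · rw [hstep, if_pos ⟨hmem, hget, hc⟩]
                  obtain ⟨hm, hb⟩ : pvMatchAt u i kw = true ∧ pvBOK u i kw.length = true := by
                    simpa [pvCond, Bool.and_eq_true] using hc
                  rw [optFind_hit u kw i hi h1 h2 hm hb]
                  simp [hmem]
                · rw [hstep, if_neg (by tauto), hget]
                  have h3 : ¬ ((0:Int) = 0 ∧ pvMatchAt u i kw = true ∧ pvBOK u i kw.length = true) := by
                    intro h; exact hc (by simp [pvCond, h.2.1, h.2.2])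
                  rw [optFind_skip u kw 0 i hi h1 h2 h3]
                  simp [hmem]
            · rw [if_neg hmem]
              unfold pvScanStep
              rw [hstep, if_neg (by tauto)]
              exact (if_neg hmem).symm
          · rw [if_neg hd0, ih (i+1) hfuel' depth d kw]
            have h3 : ¬ (depth = 0 ∧ pvMatchAt u i kw = true ∧ pvBOK u i kw.length = true) := by
              intro h; exact hd0 h.1
            split
            · rw [optFind_skip u kw depth i hi h1 h2 h3]
            · rfl
    · rw [pvScanAux, dif_neg hi, optFind_end u kw depth i hi]
      split <;> simp

theorem scanStep_nodup (u : List Char) (i : Nat) (kws : List (List Char))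
    (d : PySem.Dict (List Char) Int) (h : d.keys.Nodup) :
    (kws.foldl (fun d k => if !d.contains k && pvMatchAt u i k && pvBOK u i k.length
        then d.insert k (i:Int) else d) d).keys.Nodup := by
  induction kws generalizing d with
  | nil => exact h
  | cons k rest ih =>
    simp only [List.foldl_cons]
    apply ih
    split
    · exact PySem.Dict.nodup_keys_insert _ _ _ h
    · exact h

theorem scanAux_nodup (u : List Char) (fuel : Nat) :
    ∀ (i : Nat), u.length - i ≤ fuel → ∀ (depth : Int) (d : PySem.Dict (List Char) Int),
    d.keys.Nodup → (pvScanAux u depth i d).keys.Nodup := by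
  induction fuel with
  | zero =>
    intro i hfuel depth d h
    rw [pvScanAux, dif_neg (by omega)]; exact h
  | succ n ih =>
    intro i hfuel depth d h
    by_cases hi : i < u.length
    · rw [pvScanAux, dif_pos hi]
      have hfuel' : u.length - (i+1) ≤ n := by omega
      split
      · exact ih (i+1) hfuel' _ _ h
      · split
        · exact ih (i+1) hfuel' _ _ h
        · split
          · exact ih (i+1) hfuel' _ _ (scanStep_nodup u i pvClauseKws d h)
          · exact ih (i+1) hfuel' _ _ h
    · rw [pvScanAux, dif_neg hi]; exact h

theorem findAux_prefix (u kw : List Char) (fuel : Nat) :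
    ∀ (i : Nat), u.length - i ≤ fuel → ∀ (depth : Int),
    0 ≤ pvFindAux u kw depth i →
    kw <+: u.drop (pvFindAux u kw depth i).toNat := by
  induction fuel with
  | zero =>
    intro i hfuel depth hge
    rw [pvFindAux, dif_neg (by omega)] at hge
    omega
  | succ n ih =>
    intro i hfuel depth hge
    by_cases hi : i < u.length
    · rw [pvFindAux, dif_pos hi] at hge ⊢
      have hfuel' : u.length - (i+1) ≤ n := by omega
      by_cases h1 : u[i] = '('
      · rw [if_pos h1] at hge ⊢; exact ih (i+1) hfuel' _ hge
      · rw [if_neg h1] at hge ⊢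
        by_cases h2 : u[i] = ')'
        · rw [if_pos h2] at hge ⊢; exact ih (i+1) hfuel' _ hge
        · rw [if_neg h2] at hge ⊢
          by_cases hd : depth = 0 ∧ pvMatchAt u i kw = true
          · rw [if_pos hd] at hge ⊢
            by_cases hb : pvBOK u i kw.length = true
            · rw [if_pos hb]
              have hm := hd.2
              unfold pvMatchAt at hm
              rw [PySem.List.slice_natCast_add] at hm
              have heq : List.take kw.length (List.drop i u) = kw := by
                simpa using hm
              simp only [Int.toNat_natCast]
              rw [← heq]
              exact List.take_prefix _ _
            · rw [if_neg hb] at hge ⊢; exact ih (i+1) hfuel' _ hge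
          · rw [if_neg hd] at hge ⊢; exact ih (i+1) hfuel' _ hge
    · rw [pvFindAux, dif_neg hi] at hge; omega

theorem upper_clauseKws : ∀ kw ∈ pvClauseKws, PySem.Chars.upper kw = kw := by decide

theorem noPrefixPairs : ∀ k1 ∈ pvClauseKws, ∀ k2 ∈ pvClauseKws, k1 ≠ k2 → ¬ k1 <+: k2 := by decide

theorem nodup_clauseKws : pvClauseKws.Nodup := by decide

theorem findTL_eq (u kw : List Char) (h : kw ∈ pvClauseKws) :
    pvFindTL u kw = pvFindAux u kw 0 0 := by
  unfold pvFindTL; rw [upper_clauseKws kw h]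

theorem findTL_distinct (u : List Char) (k1 k2 : List Char)
    (h1 : k1 ∈ pvClauseKws) (h2 : k2 ∈ pvClauseKws) (hne : k1 ≠ k2)
    (hge : 0 ≤ pvFindTL u k1) (heq : pvFindTL u k1 = pvFindTL u k2) :
    False := by
  rw [findTL_eq u k1 h1] at hge heq
  rw [findTL_eq u k2 h2] at heq
  have p1 := findAux_prefix u k1 u.length 0 (by omega) 0 hge
  have p2 := findAux_prefix u k2 u.length 0 (by omega) 0 (heq ▸ hge)
  rw [heq] at p1
  rcases List.prefix_or_prefix_of_prefix p1 p2 with hp | hp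
  · exact noPrefixPairs k1 h1 k2 h2 hne hp
  · exact noPrefixPairs k2 h2 k1 h1 (Ne.symm hne) hp

theorem main_lemma (u : List Char) :
    PySem.List.sorted
        ((pvScanAux u 0 0 PySem.Dict.empty).items.map (fun kp => (kp.2, kp.1))) (fun x => x.1) false
      = PySem.List.sorted
        (pvClauseKws.foldl
          (fun acc kw => if 0 ≤ pvFindTL u kw then acc ++ [(pvFindTL u kw, kw)] else acc) [])
        (fun x => x.1) false := by
  set found := pvScanAux u 0 0 PySem.Dict.empty with hfound
  have hget : ∀ kw, found.get? kw =
      if kw ∈ pvClauseKws then pvOptFind u kw 0 0 else none := by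
    intro kw
    rw [hfound, scanAux_get? u u.length 0 (by omega) 0 PySem.Dict.empty kw]
    simp [PySem.Dict.get?_empty]
  have hnd : found.keys.Nodup :=
    scanAux_nodup u u.length 0 (by omega) 0 PySem.Dict.empty PySem.Dict.nodup_keys_empty
  -- A's pre-sort list
  rw [PySem.List.foldl_append_ite (p := fun kw => 0 ≤ pvFindTL u kw)
    (f := fun kw => (pvFindTL u kw, kw)), List.nil_append]
  set L := List.map (fun kw => (pvFindTL u kw, kw))
      (pvClauseKws.filter (fun kw => decide (0 ≤ pvFindTL u kw))) with hL
  -- getD on found members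
  have hgetD : ∀ k ∈ found.keys, found.getD k 0 = pvFindTL u k := by
    intro k hk
    have hne : found.get? k ≠ none := by
      rw [Ne, PySem.Dict.get?_eq_none_iff_not_mem_keys]; simp [hk]
    rw [hget k] at hne
    by_cases hm : k ∈ pvClauseKws
    · rw [PySem.Dict.getD_eq_get?_getD, hget k, if_pos hm]
      rw [if_pos hm] at hne
      unfold pvOptFind at hne ⊢
      rw [findTL_eq u k hm]
      by_cases hge : 0 ≤ pvFindAux u k 0 0
      · simp [hge]
      · simp [hge] at hne
    · rw [if_neg hm] at hne; exact absurd rfl hne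
  have hitems := PySem.Dict.items_eq_map_keys found hnd 0
  have hkeys_mem : ∀ k, k ∈ found.keys ↔
      k ∈ pvClauseKws.filter (fun kw => decide (0 ≤ pvFindTL u kw)) := by
    intro k
    have h1 : k ∈ found.keys ↔ ¬ found.get? k = none := by
      rw [PySem.Dict.get?_eq_none_iff_not_mem_keys]; tauto
    rw [h1, hget k, List.mem_filter]
    by_cases hm : k ∈ pvClauseKws
    · rw [if_pos hm]
      unfold pvOptFind
      rw [findTL_eq u k hm] at *
      by_cases hge : 0 ≤ pvFindAux u k 0 0
      · simp [hge, hm]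
      · simp [hge, hm]
    · simp [hm]
  have hperm : found.keys.Perm (pvClauseKws.filter fun kw => decide (0 ≤ pvFindTL u kw)) :=
    (List.perm_ext_iff_of_nodup hnd (nodup_clauseKws.filter _)).mpr hkeys_mem
  have hmapped : found.items.map (fun kp => (kp.2, kp.1))
      = found.keys.map (fun k => (pvFindTL u k, k)) := by
    rw [hitems, List.map_map]
    exact List.map_congr_left (fun k hk => by simp [hgetD k hk])
  have hpermL : (found.items.map fun kp => (kp.2, kp.1)).Perm L := by
    rw [hmapped, hL]; exact hperm.map _
  set Z := PySem.List.sorted L (fun x => x.1) false with hZ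
  have hZperm : Z.Perm L := PySem.List.sorted_perm L _ false
  have hZle : Z.Pairwise (fun a b => a.1 ≤ b.1) := PySem.List.sorted_pairwise L _
  have hLnodup : L.Nodup := by
    rw [hL]
    apply List.Nodup.map
    · intro a b hab
      have := congrArg Prod.snd hab
      simpa using this
    · exact nodup_clauseKws.filter _
  have hZnodup : Z.Nodup := hZperm.nodup_iff.mpr hLnodup
  have hmemL : ∀ x ∈ L, x = (pvFindTL u x.2, x.2) ∧ x.2 ∈ pvClauseKws ∧ 0 ≤ pvFindTL u x.2 := by
    intro x hx
    rw [hL] at hx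
    simp only [List.mem_map, List.mem_filter] at hx
    obtain ⟨k, ⟨hk1, hk2⟩, rfl⟩ := hx
    exact ⟨rfl, hk1, by simpa using hk2⟩
  have hZlt : Z.Pairwise (fun a b => a.1 < b.1) := by
    refine List.Pairwise.imp_of_mem ?_ (hZle.and hZnodup)
    intro a b ha hb hab
    rcases hab with ⟨hle, hneq⟩
    rcases hmemL a (hZperm.subset ha) with ⟨ha1, ha2, ha3⟩
    rcases hmemL b (hZperm.subset hb) with ⟨hb1, hb2, hb3⟩
    rcases lt_or_eq_of_le hle with h | h
    · exact h
    · exfalso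
      by_cases hk : a.2 = b.2
      · exact hneq (by rw [ha1, hb1, hk])
      · refine findTL_distinct u a.2 b.2 ha2 hb2 hk ha3 ?_
        have h1 : a.1 = pvFindTL u a.2 := by rw [ha1]
        have h2 : b.1 = pvFindTL u b.2 := by rw [hb1]
        rw [← h1, ← h2, h]
  have hfinal : PySem.List.sorted (found.items.map fun kp => (kp.2, kp.1)) (fun x => x.1) false = Z :=
    PySem.List.sorted_eq_of_perm_of_pairwise_lt _ Z _ (hZperm.trans hpermL.symm) hZlt
  rw [hfinal]

theorem assemble_eq (s : List Char) (ps : List (Int × List Char)) :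
    pvAssembleA s ps = pvAssembleB s ps := by
  unfold pvAssembleA pvAssembleB
  have hs : PySem.List.slice ps (some 1) none = ps.drop 1 := by
    have := PySem.List.slice_from (xs:=ps) (a:=1) (by norm_num)
    simpa using this
  rw [PySem.List.foldl_append_singleton_eq_map, List.nil_append, hs]
  apply List.ext_getElem
  · simp [PySem.List.length_enumerate]; omega
  · intro k hk1 hk2
    have hk : k < ps.length := by simpa [PySem.List.length_enumerate] using hk1
    simp only [PySem.List.getElem_enumerate, List.getElem_map, List.getElem_zip]
    by_cases h : k + 1 < ps.length
    · have h1 : ((0:Int) + k) + 1 < (ps.length : Int) := by omega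
      have h2 : PySem.List.pyGetD ps (((0:Int) + k) + 1) (0, []) = ps[k+1] := by
        rw [PySem.List.pyGetD_eq_getElem ps (0,[]) (by omega) (by omega)]
        norm_num
      rw [if_pos h1, h2]
      rw [List.getElem_append_left (by simpa using (by omega : k < ps.length - 1))]
      simp
    · have h1 : ¬ (((0:Int) + k) + 1 < (ps.length : Int)) := by omega
      rw [if_neg h1]
      rw [List.getElem_append_right (by simpa using (by omega : ¬ k < ps.length - 1))]
      simp

-- ===== VERDICT (by name: the statement is the Claim_ definition above) =====
theorem extract_top_level_clauses_py_spec : Claim_equal_extract_top_level_clauses_py := by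
  intro sql _
  unfold Spec_extract_top_level_clauses_py extract_top_level_clauses_py extract_top_level_clauses_py_alt
  cases hso : pvSetOpDetect sql.toList pvSetOps with
  | some v => simp [hso]
  | none => simp only [hso, ← main_lemma, assemble_eq]
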